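-- pv_equiv track=rewrite | github.com/ahmeshaf/cu_kairos | cu_kairos/srl/jgung/vn_parser.py | wordoffsets2charoffsets
-- ===== SOURCE A (Python) =====
-- def wordoffsets2charoffsets(sentence, word_start, word_end):
--     """
--     to be fixed, this is a bit hacky
--     :param sentence:
--     :param word_start:
--     :param word_end:
--     :return:
--     """
--     whitespace_tokenized = sentence.split(" ")
--     char_start = 0
--     char_end = 0
--     char_count = 0
--     for i, token in enumerate(whitespace_tokenized):
--         if i == word_start:
--             char_start = char_count
--         char_count += len(token)
--         if i == word_end:
--             char_end = char_count
--         if i < len(whitespace_tokenized):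
--             # add one for whitespace
--             char_count += 1
--
--     return char_start, char_end
-- ===== SOURCE B (Python) =====
-- def wordoffsets2charoffsets(sentence, word_start, word_end):
--     tokens = sentence.split(" ")
--     n = len(tokens)
--     if 0 <= word_start < n:
--         char_start = len(" ".join(tokens[:word_start])) + (1 if word_start > 0 else 0)
--     else:
--         char_start = 0
--     if 0 <= word_end < n:
--         char_end = len(" ".join(tokens[:word_end + 1]))
--     else:
--         char_end = 0
--     return char_start, char_end
-- ===== Notes on version B (the rewrite author's own statement) =====
-- stated objective: simpler
-- what changed: Replaces A's single accumulating scan over enumerated tokens with direct arithmetic: each offset is computed independently from the length of a ' '.join of a token-list slice, with an explicit range guard reproducing A's default of 0 for out-of-range indices.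
import Mathlib
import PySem

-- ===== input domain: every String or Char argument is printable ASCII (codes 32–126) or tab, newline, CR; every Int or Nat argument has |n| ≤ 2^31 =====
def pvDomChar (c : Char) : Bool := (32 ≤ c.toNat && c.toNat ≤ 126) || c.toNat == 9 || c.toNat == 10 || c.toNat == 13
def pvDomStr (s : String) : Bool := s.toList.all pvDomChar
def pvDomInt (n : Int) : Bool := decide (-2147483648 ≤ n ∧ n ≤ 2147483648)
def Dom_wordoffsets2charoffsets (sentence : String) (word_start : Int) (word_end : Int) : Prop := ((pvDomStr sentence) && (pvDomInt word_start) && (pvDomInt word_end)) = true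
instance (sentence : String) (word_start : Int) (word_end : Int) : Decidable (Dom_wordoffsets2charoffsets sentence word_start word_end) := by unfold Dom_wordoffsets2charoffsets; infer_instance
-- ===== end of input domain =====

-- B computes each character offset directly from the length of a ' '.join of a token-list
-- slice instead of A's single accumulating scan over enumerated tokens (objective: simpler).

-- ===== PORT A =====
-- A's for-loop over enumerate(tokens); state = (char_start, char_end, char_count)
def loopA (ws we nn : Int) : List (Int × String) → Int × Int × Int → Int × Int × Int
  | [], st => st
  | (i, tok) :: rest, (cs, ce, cc) =>
    loopA ws we nn rest
      (if i = ws then cc else cs,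
       if i = we then cc + PySem.Str.len tok else ce,
       if i < nn then cc + PySem.Str.len tok + 1 else cc + PySem.Str.len tok)

def wordoffsets2charoffsets (sentence : String) (word_start : Int) (word_end : Int) : Int × Int :=
  let toks := (PySem.Str.split? sentence " ").getD []
  let r := loopA word_start word_end (toks.length : Int) (PySem.List.enumerate toks) (0, 0, 0)
  (r.1, r.2.1)

-- ===== PORT B =====
def wordoffsets2charoffsets_alt (sentence : String) (word_start : Int) (word_end : Int) : Int × Int :=
  let toks := (PySem.Str.split? sentence " ").getD []
  let n : Int := (toks.length : Int)
  let cs : Int :=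
    if 0 ≤ word_start ∧ word_start < n then
      PySem.Str.len (PySem.Str.join " " (PySem.List.slice toks none (some word_start))) +
        (if 0 < word_start then 1 else 0)
    else 0
  let ce : Int :=
    if 0 ≤ word_end ∧ word_end < n then
      PySem.Str.len (PySem.Str.join " " (PySem.List.slice toks none (some (word_end + 1))))
    else 0
  (cs, ce)

-- ===== PRECONDITION & SPEC =====
def Spec_wordoffsets2charoffsets (sentence : String) (word_start : Int) (word_end : Int) (out : Int × Int) : Prop := out = wordoffsets2charoffsets_alt sentence word_start word_end
instance (sentence : String) (word_start : Int) (word_end : Int) (out : Int × Int) : Decidable (Spec_wordoffsets2charoffsets sentence word_start word_end out) := by unfold Spec_wordoffsets2charoffsets; infer_instance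

-- ===== CLAIM (what is proved, stated in full; the proofs are below) =====
def Claim_equal_wordoffsets2charoffsets : Prop := ∀ (sentence : String) (word_start : Int) (word_end : Int), Dom_wordoffsets2charoffsets sentence word_start word_end → Spec_wordoffsets2charoffsets sentence word_start word_end (wordoffsets2charoffsets sentence word_start word_end)

-- ===== LEMMAS AND PROOFS =====

-- pvP ts k = characters A's counter has consumed after the first k tokens (each token + one space)
def pvP (ts : List String) (k : Nat) : Int := ((ts.take k).map PySem.Str.len).sum + k
-- pvQ ts k = A's char_end value when word_end hits the k-th token
def pvQ (ts : List String) (k : Nat) : Int := pvP ts k + PySem.Str.len (ts.getD k "")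

lemma pvP_zero (ts : List String) : pvP ts 0 = 0 := by simp [pvP]

lemma pvP_succ (t : String) (ts : List String) (k : Nat) :
    pvP (t :: ts) (k + 1) = PySem.Str.len t + 1 + pvP ts k := by
  simp [pvP]; ring

lemma pvQ_succ (t : String) (ts : List String) (k : Nat) :
    pvQ (t :: ts) (k + 1) = PySem.Str.len t + 1 + pvQ ts k := by
  simp [pvQ, pvP_succ]; ring

lemma pvP_succ_getD (ts : List String) (k : Nat) (hk : k < ts.length) :
    pvP ts (k + 1) = pvP ts k + PySem.Str.len (ts.getD k "") + 1 := by
  unfold pvP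
  rw [List.take_add_one, List.getElem?_eq_getElem hk, List.getD_eq_getElem?_getD,
      List.getElem?_eq_getElem hk]
  simp only [Option.toList_some, List.map_append, List.sum_append, List.map_cons, List.map_nil,
    List.sum_cons, List.sum_nil, Option.getD_some]
  push_cast
  ring

lemma loopA_spec (ws we nn : Int) (ts : List String) : ∀ (i0 cs ce cc : Int),
    i0 + ts.length ≤ nn →
    loopA ws we nn (PySem.List.enumerate ts i0) (cs, ce, cc) =
      ((if i0 ≤ ws ∧ ws < i0 + ts.length then cc + pvP ts (ws - i0).toNat else cs),
       (if i0 ≤ we ∧ we < i0 + ts.length then cc + pvQ ts (we - i0).toNat else ce),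
       cc + pvP ts ts.length) := by
  induction ts with
  | nil =>
    intro i0 cs ce cc _
    simp only [PySem.List.enumerate_nil, loopA, List.length_nil]
    rw [if_neg (by omega), if_neg (by omega), pvP_zero]
    simp
  | cons t rest ih =>
    intro i0 cs ce cc h
    simp only [List.length_cons] at h
    rw [PySem.List.enumerate_cons]
    simp only [loopA]
    rw [if_pos (show i0 < nn by push_cast at h; omega)]
    rw [ih (i0 + 1) _ _ _ (by push_cast at h ⊢; omega)]
    refine Prod.ext ?_ (Prod.ext ?_ ?_) <;> simp only [List.length_cons] <;> push_cast
    · split_ifs with h1 h2 h3 <;> try omega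
      · have hk : (ws - i0).toNat = (ws - (i0 + 1)).toNat + 1 := by omega
        rw [hk, pvP_succ]; ring
      · have hk : (ws - i0).toNat = 0 := by omega
        rw [hk, pvP_zero]; omega
    · split_ifs with h1 h2 h3 <;> try omega
      · have hk : (we - i0).toNat = (we - (i0 + 1)).toNat + 1 := by omega
        rw [hk, pvQ_succ]; ring
      · have hk : (we - i0).toNat = 0 := by omega
        rw [hk]
        simp [pvQ, pvP_zero]
    · rw [pvP_succ]; ring

lemma charsJoinLen (ps : List (List Char)) :
    (PySem.Chars.join [' '] ps).length = (ps.map List.length).sum + (ps.length - 1) := by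
  induction ps with
  | nil => simp [PySem.Chars.join_nil]
  | cons p rest ih =>
    cases rest with
    | nil => simp [PySem.Chars.join_singleton]
    | cons q rest' =>
      rw [PySem.Chars.join_cons_cons]
      simp only [List.length_append, List.map_cons, List.sum_cons, List.length_cons,
        List.length_nil] at ih ⊢
      omega

lemma sumLenCast (l : List String) :
    ((l.map (List.length ∘ String.toList)).sum : Int) = (l.map PySem.Str.len).sum := by
  induction l with
  | nil => simp
  | cons a l ihl =>
    simp only [List.map_cons, List.sum_cons, Nat.cast_add, Function.comp_apply,
      PySem.Str.len_eq, ihl]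

lemma lenJoinTake (ts : List String) (k : Nat) (hk : k ≤ ts.length) (hk0 : 0 < k) :
    PySem.Str.len (PySem.Str.join " " (ts.take k)) = pvP ts k - 1 := by
  rw [PySem.Str.len_eq, PySem.Str.toList_join, show (" ".toList) = [' '] from rfl, charsJoinLen]
  unfold pvP
  rw [List.map_map, List.length_map]
  have hl : (ts.take k).length = k := by simp [hk]
  rw [hl, Nat.cast_add, sumLenCast]
  omega

-- ===== VERDICT (by name: the statement is the Claim_ definition above) =====
theorem wordoffsets2charoffsets_spec : Claim_equal_wordoffsets2charoffsets := by
  intro s ws we _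
  unfold Spec_wordoffsets2charoffsets wordoffsets2charoffsets wordoffsets2charoffsets_alt
  dsimp only
  set toks := (PySem.Str.split? s " ").getD [] with htoks
  rw [loopA_spec ws we (toks.length : Int) toks 0 0 0 0 (by simp)]
  simp only [sub_zero, zero_add]
  refine Prod.ext ?_ ?_
  · simp only []
    by_cases hws : 0 ≤ ws ∧ ws < (toks.length : Int)
    · rw [if_pos (by omega), if_pos hws]
      rw [PySem.List.slice_to toks hws.1]
      by_cases h0 : 0 < ws
      · rw [if_pos h0, lenJoinTake toks ws.toNat (by omega) (by omega)]
        omega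
      · have hz : ws = 0 := by omega
        subst hz
        simp [pvP_zero, PySem.Str.join, PySem.Str.len]
    · rw [if_neg (by omega), if_neg hws]
  · simp only []
    by_cases hwe : 0 ≤ we ∧ we < (toks.length : Int)
    · rw [if_pos (by omega), if_pos hwe]
      rw [PySem.List.slice_to toks (by omega)]
      rw [lenJoinTake toks (we + 1).toNat (by omega) (by omega)]
      have hk : (we + 1).toNat = we.toNat + 1 := by omega
      have hsucc : pvP toks (we.toNat + 1) = pvQ toks we.toNat + 1 := by
        rw [pvP_succ_getD toks we.toNat (by omega)]; unfold pvQ; ring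
      rw [hk, hsucc]; omega
    · rw [if_neg (by omega), if_neg hwe]
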